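-- pv_equiv track=rewrite | github.com/esaatech/esaaedu-backend | home/course_recommendations.py | is_category_match
-- ===== SOURCE A (Python) =====
-- from typing import List, Dict, Optional, Tuple
--
-- INTEREST_TO_CATEGORY_MAP = {
--     'Coding': ['Programming', 'Computer Science', 'Mobile App Development', 'Web Development'],
--     'Robotics': ['Robotics', 'Internet of Things (IoT)', 'Engineering'],
--     'Electronics': ['Internet of Things (IoT)', 'Robotics', 'Engineering'],
--     'Math Skills': ['Mathematics', 'Data Science'],
--     'Game Development': ['Game Development'],
--     'Web Development': ['Web Development'],
--     '3D Design': ['Creative Technology'],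
--     'AI for Kids': ['Artificial Intelligence'],
--     'General STEM Exploration': ['Science', 'Mathematics', 'Physics', 'Chemistry', 'Biology'],
-- }
--
-- def normalize_category(category: Optional[str]) -> str:
--     """Normalizes category name for matching (handles variations)"""
--     if not category or not isinstance(category, str):
--         return ''
--     return category.strip()
--
-- def is_category_match(interest_areas: List[str], course_category: Optional[str]) -> bool:
--     """Checks if any interest area matches the course category"""
--     if not course_category:
--         return False
--
--     normalized_course_category = normalize_category(course_category)
--     if not normalized_course_category:
--         return False
--
--     for interest in interest_areas:
--         categories = INTEREST_TO_CATEGORY_MAP.get(interest, [])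
--         if any(normalize_category(cat) == normalized_course_category for cat in categories):
--             return True
--
--     return False
-- ===== SOURCE B (Python) =====
-- from typing import List, Optional
--
-- # Reverse table written out once: normalized category -> frozenset of interests that map to it.
-- _CATEGORY_TO_INTERESTS = {
--     'Programming': frozenset({'Coding'}),
--     'Computer Science': frozenset({'Coding'}),
--     'Mobile App Development': frozenset({'Coding'}),
--     'Web Development': frozenset({'Coding', 'Web Development'}),
--     'Robotics': frozenset({'Robotics', 'Electronics'}),
--     'Internet of Things (IoT)': frozenset({'Robotics', 'Electronics'}),
--     'Engineering': frozenset({'Robotics', 'Electronics'}),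
--     'Mathematics': frozenset({'Math Skills', 'General STEM Exploration'}),
--     'Data Science': frozenset({'Math Skills'}),
--     'Game Development': frozenset({'Game Development'}),
--     'Creative Technology': frozenset({'3D Design'}),
--     'Artificial Intelligence': frozenset({'AI for Kids'}),
--     'Science': frozenset({'General STEM Exploration'}),
--     'Physics': frozenset({'General STEM Exploration'}),
--     'Chemistry': frozenset({'General STEM Exploration'}),
--     'Biology': frozenset({'General STEM Exploration'}),
-- }
--
-- def is_category_match(interest_areas: List[str], course_category: Optional[str]) -> bool:
--     if not course_category:
--         return False
--     interests = _CATEGORY_TO_INTERESTS.get(course_category.strip())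
--     if interests is None:
--         return False
--     return not interests.isdisjoint(interest_areas)
-- ===== Notes on version B (the rewrite author's own statement) =====
-- stated objective: faster
-- what changed: B replaces A's per-call scans over each interest's category list (with strip() re-applied to every map value on every comparison) by a hardcoded reverse table mapping each normalized category to the frozenset of interests, so a call is one dict lookup on the stripped course category plus a set-disjointness test against interest_areas.
import Mathlib
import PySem

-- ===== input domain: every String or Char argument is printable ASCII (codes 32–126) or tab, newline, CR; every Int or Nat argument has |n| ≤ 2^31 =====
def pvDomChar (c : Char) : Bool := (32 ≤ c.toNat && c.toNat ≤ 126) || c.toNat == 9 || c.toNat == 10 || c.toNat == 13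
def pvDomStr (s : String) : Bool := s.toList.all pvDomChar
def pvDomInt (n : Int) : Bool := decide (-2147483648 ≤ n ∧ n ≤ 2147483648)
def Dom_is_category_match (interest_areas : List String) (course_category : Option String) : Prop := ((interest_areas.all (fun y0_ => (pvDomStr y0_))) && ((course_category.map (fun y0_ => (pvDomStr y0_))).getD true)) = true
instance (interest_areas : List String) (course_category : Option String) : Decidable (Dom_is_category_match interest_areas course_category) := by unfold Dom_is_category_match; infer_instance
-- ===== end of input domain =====

-- B replaces A's per-call scans over each interest's category list (re-stripping every map
-- value) by a hardcoded reverse table (normalized category -> frozenset of interests):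
-- one lookup on the stripped course category plus a set-disjointness test (objective: faster).

-- ===== PORT A =====
def pvMapA : PySem.Dict String (List String) := PySem.Dict.ofList [
  ("Coding", ["Programming", "Computer Science", "Mobile App Development", "Web Development"]),
  ("Robotics", ["Robotics", "Internet of Things (IoT)", "Engineering"]),
  ("Electronics", ["Internet of Things (IoT)", "Robotics", "Engineering"]),
  ("Math Skills", ["Mathematics", "Data Science"]),
  ("Game Development", ["Game Development"]),
  ("Web Development", ["Web Development"]),
  ("3D Design", ["Creative Technology"]),
  ("AI for Kids", ["Artificial Intelligence"]),
  ("General STEM Exploration", ["Science", "Mathematics", "Physics", "Chemistry", "Biology"])]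

def pvNormalizeA (category : Option String) : String :=
  match category with
  | none => ""
  | some s => if s = "" then "" else PySem.Str.strip s

def is_category_match (interest_areas : List String) (course_category : Option String) : Bool :=
  -- `if not course_category`
  match course_category with
  | none => false
  | some c =>
    if c = "" then false
    else
      let normalized_course_category := pvNormalizeA (some c)
      if normalized_course_category = "" then false
      else
        interest_areas.any (fun interest =>
          (pvMapA.getD interest []).any (fun cat =>
            pvNormalizeA (some cat) == normalized_course_category))

-- ===== PORT B =====
-- the module-level literal _CATEGORY_TO_INTERESTS (frozensets ported as PySem.Set)
def pvTableB : PySem.Dict String (PySem.Set String) := PySem.Dict.mk [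
  ("Programming", PySem.Set.ofList ["Coding"]),
  ("Computer Science", PySem.Set.ofList ["Coding"]),
  ("Mobile App Development", PySem.Set.ofList ["Coding"]),
  ("Web Development", PySem.Set.ofList ["Coding", "Web Development"]),
  ("Robotics", PySem.Set.ofList ["Robotics", "Electronics"]),
  ("Internet of Things (IoT)", PySem.Set.ofList ["Robotics", "Electronics"]),
  ("Engineering", PySem.Set.ofList ["Robotics", "Electronics"]),
  ("Mathematics", PySem.Set.ofList ["Math Skills", "General STEM Exploration"]),
  ("Data Science", PySem.Set.ofList ["Math Skills"]),
  ("Game Development", PySem.Set.ofList ["Game Development"]),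
  ("Creative Technology", PySem.Set.ofList ["3D Design"]),
  ("Artificial Intelligence", PySem.Set.ofList ["AI for Kids"]),
  ("Science", PySem.Set.ofList ["General STEM Exploration"]),
  ("Physics", PySem.Set.ofList ["General STEM Exploration"]),
  ("Chemistry", PySem.Set.ofList ["General STEM Exploration"]),
  ("Biology", PySem.Set.ofList ["General STEM Exploration"])]

def is_category_match_alt (interest_areas : List String) (course_category : Option String) : Bool :=
  match course_category with
  | none => false
  | some c =>
    if c = "" then false
    else
      match pvTableB.get? (PySem.Str.strip c) with
      | none => false
      | some interests => !(PySem.Set.isdisjoint interests interest_areas)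

-- ===== PRECONDITION & SPEC =====
def Spec_is_category_match (interest_areas : List String) (course_category : Option String) (out : Bool) : Prop := out = is_category_match_alt interest_areas course_category
instance (interest_areas : List String) (course_category : Option String) (out : Bool) : Decidable (Spec_is_category_match interest_areas course_category out) := by unfold Spec_is_category_match; infer_instance

-- ===== CLAIM (what is proved, stated in full; the proofs are below) =====
def Claim_equal_is_category_match : Prop := ∀ (interest_areas : List String) (course_category : Option String), Dom_is_category_match interest_areas course_category → Spec_is_category_match interest_areas course_category (is_category_match interest_areas course_category)

-- ===== LEMMAS AND PROOFS =====

-- the table with its Set.ofList constructors evaluated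
def pvTabLit : PySem.Dict String (PySem.Set String) := PySem.Dict.mk [("Programming", ["Coding"]),
            ("Computer Science", ["Coding"]),
            ("Mobile App Development", ["Coding"]),
            ("Web Development", ["Coding", "Web Development"]),
            ("Robotics", ["Robotics", "Electronics"]),
            ("Internet of Things (IoT)", ["Robotics", "Electronics"]),
            ("Engineering", ["Robotics", "Electronics"]),
            ("Mathematics", ["Math Skills", "General STEM Exploration"]),
            ("Data Science", ["Math Skills"]),
            ("Game Development", ["Game Development"]),
            ("Creative Technology", ["3D Design"]),
            ("Artificial Intelligence", ["AI for Kids"]),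
            ("Science", ["General STEM Exploration"]),
            ("Physics", ["General STEM Exploration"]),
            ("Chemistry", ["General STEM Exploration"]),
            ("Biology", ["General STEM Exploration"])]
theorem table_eq : pvTableB = pvTabLit := by decide
theorem pv_strip_0 : PySem.Str.strip "Programming" = "Programming" := by decide
theorem pv_strip_1 : PySem.Str.strip "Computer Science" = "Computer Science" := by decide
theorem pv_strip_2 : PySem.Str.strip "Mobile App Development" = "Mobile App Development" := by decide
theorem pv_strip_3 : PySem.Str.strip "Web Development" = "Web Development" := by decide
theorem pv_strip_4 : PySem.Str.strip "Robotics" = "Robotics" := by decide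
theorem pv_strip_5 : PySem.Str.strip "Internet of Things (IoT)" = "Internet of Things (IoT)" := by decide
theorem pv_strip_6 : PySem.Str.strip "Engineering" = "Engineering" := by decide
theorem pv_strip_7 : PySem.Str.strip "Mathematics" = "Mathematics" := by decide
theorem pv_strip_8 : PySem.Str.strip "Data Science" = "Data Science" := by decide
theorem pv_strip_9 : PySem.Str.strip "Game Development" = "Game Development" := by decide
theorem pv_strip_10 : PySem.Str.strip "Creative Technology" = "Creative Technology" := by decide
theorem pv_strip_11 : PySem.Str.strip "Artificial Intelligence" = "Artificial Intelligence" := by decide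
theorem pv_strip_12 : PySem.Str.strip "Science" = "Science" := by decide
theorem pv_strip_13 : PySem.Str.strip "Physics" = "Physics" := by decide
theorem pv_strip_14 : PySem.Str.strip "Chemistry" = "Chemistry" := by decide
theorem pv_strip_15 : PySem.Str.strip "Biology" = "Biology" := by decide
theorem mapA_lit : pvMapA = PySem.Dict.mk [
  ("Coding", ["Programming", "Computer Science", "Mobile App Development", "Web Development"]),
  ("Robotics", ["Robotics", "Internet of Things (IoT)", "Engineering"]),
  ("Electronics", ["Internet of Things (IoT)", "Robotics", "Engineering"]),
  ("Math Skills", ["Mathematics", "Data Science"]),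
  ("Game Development", ["Game Development"]),
  ("Web Development", ["Web Development"]),
  ("3D Design", ["Creative Technology"]),
  ("AI for Kids", ["Artificial Intelligence"]),
  ("General STEM Exploration", ["Science", "Mathematics", "Physics", "Chemistry", "Biology"])] := by decide

theorem pv_anyL0 (k : String) : List.any ["Programming", "Computer Science", "Mobile App Development", "Web Development"] (fun cat => pvNormalizeA (some cat) == k) = (("Programming" == k) || ("Computer Science" == k) || ("Mobile App Development" == k) || ("Web Development" == k)) := by
  simp [pvNormalizeA, pv_strip_0, pv_strip_1, pv_strip_2, pv_strip_3]
  try rw [Bool.or_assoc]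
  try rw [Bool.or_assoc]
  try rw [Bool.or_assoc]
theorem pv_anyL1 (k : String) : List.any ["Robotics", "Internet of Things (IoT)", "Engineering"] (fun cat => pvNormalizeA (some cat) == k) = (("Robotics" == k) || ("Internet of Things (IoT)" == k) || ("Engineering" == k)) := by
  simp [pvNormalizeA, pv_strip_4, pv_strip_5, pv_strip_6]
  try rw [Bool.or_assoc]
  try rw [Bool.or_assoc]
theorem pv_anyL2 (k : String) : List.any ["Internet of Things (IoT)", "Robotics", "Engineering"] (fun cat => pvNormalizeA (some cat) == k) = (("Internet of Things (IoT)" == k) || ("Robotics" == k) || ("Engineering" == k)) := by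
  simp [pvNormalizeA, pv_strip_4, pv_strip_5, pv_strip_6]
  try rw [Bool.or_assoc]
  try rw [Bool.or_assoc]
theorem pv_anyL3 (k : String) : List.any ["Mathematics", "Data Science"] (fun cat => pvNormalizeA (some cat) == k) = (("Mathematics" == k) || ("Data Science" == k)) := by
  simp [pvNormalizeA, pv_strip_7, pv_strip_8]
theorem pv_anyL4 (k : String) : List.any ["Game Development"] (fun cat => pvNormalizeA (some cat) == k) = (("Game Development" == k)) := by
  simp [pvNormalizeA, pv_strip_9]
theorem pv_anyL5 (k : String) : List.any ["Web Development"] (fun cat => pvNormalizeA (some cat) == k) = (("Web Development" == k)) := by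
  simp [pvNormalizeA, pv_strip_3]
theorem pv_anyL6 (k : String) : List.any ["Creative Technology"] (fun cat => pvNormalizeA (some cat) == k) = (("Creative Technology" == k)) := by
  simp [pvNormalizeA, pv_strip_10]
theorem pv_anyL7 (k : String) : List.any ["Artificial Intelligence"] (fun cat => pvNormalizeA (some cat) == k) = (("Artificial Intelligence" == k)) := by
  simp [pvNormalizeA, pv_strip_11]
theorem pv_anyL8 (k : String) : List.any ["Science", "Mathematics", "Physics", "Chemistry", "Biology"] (fun cat => pvNormalizeA (some cat) == k) = (("Science" == k) || ("Mathematics" == k) || ("Physics" == k) || ("Chemistry" == k) || ("Biology" == k)) := by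
  simp [pvNormalizeA, pv_strip_7, pv_strip_12, pv_strip_13, pv_strip_14, pv_strip_15]
  try rw [Bool.or_assoc]
  try rw [Bool.or_assoc]
  try rw [Bool.or_assoc]
  try rw [Bool.or_assoc]

def pvKeys : List String := ["Coding", "Robotics", "Electronics", "Math Skills",
  "Game Development", "Web Development", "3D Design", "AI for Kids", "General STEM Exploration"]
def pvCats : List String := ["Programming", "Computer Science", "Mobile App Development",
  "Web Development", "Robotics", "Internet of Things (IoT)", "Engineering", "Mathematics",
  "Data Science", "Game Development", "Creative Technology", "Artificial Intelligence",
  "Science", "Physics", "Chemistry", "Biology"]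

theorem pv_bucket_keys (i : String) (hi : i ∉ pvKeys) (s : PySem.Set String)
    (hs : s ∈ pvTabLit.values) : PySem.Set.contains s i = false := by
  simp only [pvTabLit, PySem.Dict.values, List.map_cons, List.map_nil] at hs
  simp only [pvKeys, List.mem_cons, not_or] at hi
  obtain ⟨h1,h2,h3,h4,h5,h6,h7,h8,h9,-⟩ := hi
  fin_cases hs <;> simp [PySem.Set.contains, h1, h2, h3, h4, h5, h6, h7, h8, h9]

set_option maxHeartbeats 2000000 in
theorem pv_inner_eq (i k : String) :
    (pvMapA.getD i []).any (fun cat => pvNormalizeA (some cat) == k)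
      = (match pvTabLit.get? k with
         | none => false
         | some s => PySem.Set.contains s i) := by
  rw [mapA_lit]
  by_cases hi : i ∈ pvKeys
  · by_cases hk : k ∈ pvCats
    · fin_cases hi <;> fin_cases hk <;> decide
    · -- k matches no normalized category: both sides false
      have hR : pvTabLit.get? k = none := by
        rw [PySem.Dict.get?_eq_none_iff_not_mem_keys]
        simp only [pvTabLit, PySem.Dict.keys, List.map_cons, List.map_nil]
        simp only [pvCats, List.mem_cons, not_or] at hk
        simp [hk]
      simp only [pvCats, List.mem_cons, not_or] at hk
      obtain ⟨k1,k2,k3,k4,k5,k6,k7,k8,k9,k10,k11,k12,k13,k14,k15,k16,-⟩ := hk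
      rw [hR]
      fin_cases hi <;>
        simp [PySem.Dict.getD, PySem.Dict.get?_mk_cons, pv_anyL0, pv_anyL1, pv_anyL2, pv_anyL3,
          pv_anyL4, pv_anyL5, pv_anyL6, pv_anyL7, pv_anyL8,
          beq_eq_false_iff_ne.2 (Ne.symm k1), beq_eq_false_iff_ne.2 (Ne.symm k2),
          beq_eq_false_iff_ne.2 (Ne.symm k3), beq_eq_false_iff_ne.2 (Ne.symm k4),
          beq_eq_false_iff_ne.2 (Ne.symm k5), beq_eq_false_iff_ne.2 (Ne.symm k6),
          beq_eq_false_iff_ne.2 (Ne.symm k7), beq_eq_false_iff_ne.2 (Ne.symm k8),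
          beq_eq_false_iff_ne.2 (Ne.symm k9), beq_eq_false_iff_ne.2 (Ne.symm k10),
          beq_eq_false_iff_ne.2 (Ne.symm k11), beq_eq_false_iff_ne.2 (Ne.symm k12),
          beq_eq_false_iff_ne.2 (Ne.symm k13), beq_eq_false_iff_ne.2 (Ne.symm k14),
          beq_eq_false_iff_ne.2 (Ne.symm k15), beq_eq_false_iff_ne.2 (Ne.symm k16),
          pvNormalizeA, pv_strip_0, pv_strip_1, pv_strip_2, pv_strip_3, pv_strip_4,
          pv_strip_5, pv_strip_6, pv_strip_7, pv_strip_8, pv_strip_9, pv_strip_10, pv_strip_11,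
          pv_strip_12, pv_strip_13, pv_strip_14, pv_strip_15,
          Ne.symm k1, Ne.symm k2, Ne.symm k3, Ne.symm k4, Ne.symm k5, Ne.symm k6, Ne.symm k7,
          Ne.symm k8, Ne.symm k9, Ne.symm k10, Ne.symm k11, Ne.symm k12, Ne.symm k13,
          Ne.symm k14, Ne.symm k15, Ne.symm k16]
  · -- unknown interest: A finds no categories, B's buckets never contain i
    have hL : (PySem.Dict.mk [
      ("Coding", ["Programming", "Computer Science", "Mobile App Development", "Web Development"]),
      ("Robotics", ["Robotics", "Internet of Things (IoT)", "Engineering"]),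
      ("Electronics", ["Internet of Things (IoT)", "Robotics", "Engineering"]),
      ("Math Skills", ["Mathematics", "Data Science"]),
      ("Game Development", ["Game Development"]),
      ("Web Development", ["Web Development"]),
      ("3D Design", ["Creative Technology"]),
      ("AI for Kids", ["Artificial Intelligence"]),
      ("General STEM Exploration", ["Science", "Mathematics", "Physics", "Chemistry", "Biology"])]
        : PySem.Dict String (List String)).get? i = none := by
      rw [PySem.Dict.get?_eq_none_iff_not_mem_keys]
      simp only [pvKeys, List.mem_cons, not_or] at hi
      simp_all [PySem.Dict.keys, PySem.Dict.items]
    rw [PySem.Dict.getD, hL]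
    simp only [Option.getD_none, List.any_nil]
    cases hfind : pvTabLit.get? k with
    | none => rfl
    | some s =>
      have hsv : s ∈ pvTabLit.values := by
        have h := PySem.Dict.mem_items_of_get?_eq_some _ hfind
        simp only [PySem.Dict.values]
        exact List.mem_map.2 ⟨(k, s), h, rfl⟩
      exact (pv_bucket_keys i hi s hsv).symm

-- both sides detect a common element of the list and the bucket
theorem pv_any_contains_comm (s t : List String) :
    t.any (fun i => PySem.Set.contains s i) = !(PySem.Set.isdisjoint s t) := by
  simp only [PySem.Set.isdisjoint, PySem.Set.contains, Bool.not_not]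
  rw [Bool.eq_iff_iff]
  simp only [List.any_eq_true]
  constructor
  · rintro ⟨x, hx, he⟩
    exact ⟨x, (List.elem_iff).1 he, (List.elem_iff).2 hx⟩
  · rintro ⟨x, hx, he⟩
    exact ⟨x, (List.elem_iff).1 he, (List.elem_iff).2 hx⟩

theorem is_category_match_spec : Claim_equal_is_category_match := by
  intro ia cc _
  unfold Spec_is_category_match is_category_match is_category_match_alt
  rw [table_eq]
  cases cc with
  | none => rfl
  | some c =>
    by_cases hc : c = ""
    · simp [hc]
    · simp only [hc, if_false]
      have hn : pvNormalizeA (some c) = PySem.Str.strip c := by simp [pvNormalizeA, hc]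
      by_cases hs : PySem.Str.strip c = ""
      · have : pvTabLit.get? "" = none := by decide
        simp [hn, hs, this]
      · rw [hn]
        simp only [hs, if_false]
        simp only [pv_inner_eq]
        cases hfind : pvTabLit.get? (PySem.Str.strip c) with
        | none => simp only [hfind]; simp
        | some s => simp only [hfind]; exact pv_any_contains_comm s ia
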